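-- pv_equiv track=rewrite | github.com/guido57/EBAZ4205_SDR_HDMI_PS2 | SpectrumPy/io_utils.py | append_hex
-- ===== SOURCE A (Python) =====
-- def append_hex(a, b):
-- 	sizeof_b = 0
-- 	# get size of b in bits
-- 	while((b >> sizeof_b) > 0):
-- 		sizeof_b += 1
-- 		if sizeof_b < 4:sizeof_b = 4
-- 	else:
-- 		# align answer to nearest 4 bits (hex digit)
-- 		sizeof_b += sizeof_b % 4
-- 	return (a << sizeof_b) | b
-- ===== SOURCE B (Python) =====
-- def append_hex(a, b):
--     if b <= 0:
--         return a | b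
--     L = b.bit_length()
--     if L < 4:
--         L = 4
--     return (a << (L + L % 4)) | b
-- ===== Notes on version B (the rewrite author's own statement) =====
-- stated objective: simpler
-- what changed: B replaces A's while-loop bit count (with its in-loop floor-to-4 bump and loop-else alignment) by a single closed-form expression using b.bit_length(), keeping the same return value.
import Mathlib
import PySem

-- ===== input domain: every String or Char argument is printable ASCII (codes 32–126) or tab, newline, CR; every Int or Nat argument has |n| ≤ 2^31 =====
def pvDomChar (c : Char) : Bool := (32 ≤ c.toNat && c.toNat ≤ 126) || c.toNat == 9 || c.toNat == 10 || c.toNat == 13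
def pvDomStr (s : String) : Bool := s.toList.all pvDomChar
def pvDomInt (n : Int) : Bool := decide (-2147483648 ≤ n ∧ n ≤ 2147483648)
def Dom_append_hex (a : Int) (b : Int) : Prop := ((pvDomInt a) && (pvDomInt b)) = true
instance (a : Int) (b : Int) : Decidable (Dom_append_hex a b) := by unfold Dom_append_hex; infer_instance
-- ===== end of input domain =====

-- B computes the bit width by a closed form over bit_length instead of A's counting loop; objective: simpler.

-- ===== PORT A =====
-- two facts cited by the loop's termination proof
lemma pyShiftRight_nonpos (b : Int) (s : Nat) (hb : b ≤ 0) : b >>> s ≤ 0 := by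
  rw [Int.shiftRight_eq_div_pow]
  have := Int.ediv_le_ediv (c := ((2^s : Nat) : Int)) (by positivity) hb
  simpa using this

lemma lt_natAbs_of_shift_pos (b : Int) (s : Nat) (h : 0 < b >>> s) : s < b.natAbs := by
  have hb : 0 < b := by
    by_contra hc
    have := pyShiftRight_nonpos b s (by omega)
    omega
  rw [← Int.toNat_of_nonneg hb.le, ← Int.natCast_shiftRight] at h
  have h' : 0 < b.toNat >>> s := by exact_mod_cast h
  rw [Nat.shiftRight_eq_div_pow, Nat.div_pos_iff] at h'
  have := Nat.lt_two_pow_self (n := s)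
  omega

-- A's while loop: counts bits of b, bumping the counter to 4 while it is below 4;
-- the loop's else-clause then adds counter % 4. Ported as structural recursion on
-- the same state (the counter s).
def append_hexLoop (b : Int) (s : Nat) : Nat :=
  if 0 < b >>> s then
    append_hexLoop b (if s + 1 < 4 then 4 else s + 1)
  else
    s + s % 4
termination_by b.natAbs - s
decreasing_by
  have := lt_natAbs_of_shift_pos b s (by assumption)
  split <;> omega

def append_hex (a : Int) (b : Int) : Int :=
  PySem.Int.bor (a <<< append_hexLoop b 0) b

-- ===== PORT B =====
def append_hex_alt (a : Int) (b : Int) : Int :=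
  if b ≤ 0 then
    PySem.Int.bor a b
  else
    let L0 := PySem.Int.bitLength b
    let L := if L0 < 4 then 4 else L0
    PySem.Int.bor (a <<< (L + L % 4)) b

-- ===== PRECONDITION & SPEC =====
def Spec_append_hex (a : Int) (b : Int) (out : Int) : Prop := out = append_hex_alt a b
instance (a : Int) (b : Int) (out : Int) : Decidable (Spec_append_hex a b out) := by unfold Spec_append_hex; infer_instance

-- ===== CLAIM (what is proved, stated in full; the proofs are below) =====
def Claim_equal_append_hex : Prop := ∀ (a : Int) (b : Int), Dom_append_hex a b → Spec_append_hex a b (append_hex a b)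

-- ===== LEMMAS AND PROOFS =====

-- For positive b, the loop guard holds exactly below bit_length b.
lemma guard_iff (b : Int) (hb : 0 < b) (s : Nat) :
    0 < b >>> s ↔ s < PySem.Int.bitLength b := by
  have hub : b.toNat < 2 ^ PySem.Int.bitLength b := by
    have := PySem.Int.lt_two_pow_bitLength b; omega
  have hlb : 2 ^ (PySem.Int.bitLength b - 1) ≤ b.toNat := by
    have := PySem.Int.two_pow_bitLength_le b (by omega); omega
  rw [show b >>> s = ((b.toNat >>> s : Nat) : Int) by
        conv_lhs => rw [← Int.toNat_of_nonneg hb.le]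
        rw [Int.natCast_shiftRight]]
  rw [show (0:Int) < ((b.toNat >>> s : Nat) : Int) ↔ 0 < b.toNat >>> s by exact_mod_cast Iff.rfl]
  rw [Nat.shiftRight_eq_div_pow, Nat.div_pos_iff]
  have hp : 0 < 2 ^ s := Nat.two_pow_pos s
  constructor
  · rintro ⟨-, hle⟩
    by_contra hc
    have : (2:ℕ) ^ PySem.Int.bitLength b ≤ 2 ^ s :=
      Nat.pow_le_pow_right (by norm_num) (by omega)
    omega
  · intro h
    have : (2:ℕ) ^ s ≤ 2 ^ (PySem.Int.bitLength b - 1) :=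
      Nat.pow_le_pow_right (by norm_num) (by omega)
    exact ⟨hp, by omega⟩

-- The loop from any counter s ≥ 4 stops at max s (bitLength b) and aligns it.
lemma loop_from_ge4 (b : Int) (hb : 0 < b) :
    ∀ (k s : Nat), 4 ≤ s → PySem.Int.bitLength b ≤ s + k →
      append_hexLoop b s = max s (PySem.Int.bitLength b) + max s (PySem.Int.bitLength b) % 4 := by
  intro k
  induction k with
  | zero =>
    intro s _ hk
    rw [append_hexLoop, if_neg (by rw [guard_iff b hb]; omega)]
    have : max s (PySem.Int.bitLength b) = s := by omega
    rw [this]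
  | succ k ih =>
    intro s hs hk
    by_cases hlt : s < PySem.Int.bitLength b
    · rw [append_hexLoop, if_pos (by rw [guard_iff b hb]; omega), if_neg (by omega)]
      rw [ih (s + 1) (by omega) (by omega)]
      have : max (s + 1) (PySem.Int.bitLength b) = max s (PySem.Int.bitLength b) := by omega
      rw [this]
    · rw [append_hexLoop, if_neg (by rw [guard_iff b hb]; omega)]
      have : max s (PySem.Int.bitLength b) = s := by omega
      rw [this]

lemma loop_zero_pos (b : Int) (hb : 0 < b) :
    append_hexLoop b 0 =
      max 4 (PySem.Int.bitLength b) + max 4 (PySem.Int.bitLength b) % 4 := by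
  have hL1 : 1 ≤ PySem.Int.bitLength b := by
    have h := PySem.Int.lt_two_pow_bitLength b
    by_contra hc
    rw [Nat.le_zero.mp (by omega : PySem.Int.bitLength b ≤ 0)] at h
    simp at h
    omega
  rw [append_hexLoop, if_pos (by rw [guard_iff b hb]; omega), if_pos (by omega)]
  exact loop_from_ge4 b hb (PySem.Int.bitLength b) 4 (by omega) (by omega)

lemma loop_zero_nonpos (b : Int) (hb : b ≤ 0) : append_hexLoop b 0 = 0 := by
  rw [append_hexLoop, if_neg (by have := pyShiftRight_nonpos b 0 hb; omega)]

-- ===== VERDICT (by name: the statement is the Claim_ definition above) =====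
theorem append_hex_spec : Claim_equal_append_hex := by
  intro a b _
  unfold Spec_append_hex append_hex append_hex_alt
  by_cases hb : b ≤ 0
  · rw [if_pos hb, loop_zero_nonpos b hb, Int.shiftLeft_zero]
  · push_neg at hb
    rw [if_neg (by omega), loop_zero_pos b hb]
    have : (if PySem.Int.bitLength b < 4 then 4 else PySem.Int.bitLength b)
        = max 4 (PySem.Int.bitLength b) := by split <;> omega
    simp only [this]
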